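-- pv_equiv track=rewrite | github.com/mstroshin/ArcHelper | src/overlay.py | _normalize_image_id
-- ===== SOURCE A (Python) =====
-- def _normalize_image_id(item_id: str) -> str:
--     """Normalize item id for image lookup.
--
--     Weapons have JSON ids ending with _i, _ii, _iii, _iv but images dont use suffixes.
--     """
--     try:
--         lower = item_id.lower()
--         for suffix in ('_i', '_ii', '_iii', '_iv'):
--             if lower.endswith(suffix):
--                 # Strip the roman part and append _1
--                 base = item_id[: -len(suffix)]
--                 return base
--     except Exception:
--         pass
--     return item_id
-- ===== SOURCE B (Python) =====
-- def _normalize_image_id(item_id: str) -> str: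
--     """Normalize item id for image lookup (rpartition-based)."""
--     try:
--         base, sep, tail = item_id.rpartition('_')
--         if sep and tail.lower() in ('i', 'ii', 'iii', 'iv'):
--             return base
--     except Exception:
--         pass
--     return item_id
-- ===== Notes on version B (the rewrite author's own statement) =====
-- stated objective: idiomatic
-- what changed: Replaced the loop over four suffixes with endswith+slice by a single rpartition at the last underscore and one membership test of the lowered tail among the four roman numerals.
import Mathlib
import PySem

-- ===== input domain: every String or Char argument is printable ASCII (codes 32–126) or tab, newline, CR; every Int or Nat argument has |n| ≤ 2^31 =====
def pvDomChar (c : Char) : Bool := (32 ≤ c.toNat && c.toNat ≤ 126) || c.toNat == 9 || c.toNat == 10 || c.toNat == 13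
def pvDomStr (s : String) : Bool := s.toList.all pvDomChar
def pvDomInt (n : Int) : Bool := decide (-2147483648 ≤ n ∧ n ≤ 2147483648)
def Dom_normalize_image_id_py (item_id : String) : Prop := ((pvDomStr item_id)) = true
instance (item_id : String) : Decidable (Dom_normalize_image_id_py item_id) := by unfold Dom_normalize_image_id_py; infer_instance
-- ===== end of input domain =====

-- B strips the roman weapon suffix by one rpartition at the last '_' plus a membership test of
-- the lowered tail in {i, ii, iii, iv}, instead of A's loop of four lowered-endswith checks
-- (objective: idiomatic; same cost).

-- ===== PORT A =====
def normalize_image_id_py (item_id : String) : String :=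
  let lower := PySem.Str.lower item_id
  if PySem.Str.endswith lower "_i" then PySem.Str.slice item_id none (some (-2))
  else if PySem.Str.endswith lower "_ii" then PySem.Str.slice item_id none (some (-3))
  else if PySem.Str.endswith lower "_iii" then PySem.Str.slice item_id none (some (-4))
  else if PySem.Str.endswith lower "_iv" then PySem.Str.slice item_id none (some (-3))
  else item_id

-- ===== PORT B =====
-- hand port of str.rpartition('_') for the one-char separator '_' (exact: splits at the LAST
-- occurrence; ([], [], l) when '_' does not occur, matching Python's ('', '', s))
def pyRPartitionUnderscore (l : List Char) : List Char × List Char × List Char :=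
  let r := l.reverse
  let t := r.takeWhile (fun c => c != '_')
  if t.length = r.length then ([], [], l)
  else ((r.drop (t.length + 1)).reverse, ['_'], t.reverse)

def normalize_image_id_py_alt (item_id : String) : String :=
  let p := pyRPartitionUnderscore item_id.toList
  if p.2.1 ≠ ([] : List Char) ∧
     PySem.Chars.lower p.2.2 ∈ [['i'], ['i','i'], ['i','i','i'], ['i','v']]
  then String.ofList p.1
  else item_id

-- ===== PRECONDITION & SPEC =====
def Spec_normalize_image_id_py (item_id : String) (out : String) : Prop := out = normalize_image_id_py_alt item_id
instance (item_id : String) (out : String) : Decidable (Spec_normalize_image_id_py item_id out) := by unfold Spec_normalize_image_id_py; infer_instance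

-- ===== CLAIM (what is proved, stated in full; the proofs are below) =====
def Claim_equal_normalize_image_id_py : Prop := ∀ (item_id : String), Dom_normalize_image_id_py item_id → Spec_normalize_image_id_py item_id (normalize_image_id_py item_id)

-- ===== LEMMAS AND PROOFS =====

-- list-level restatement of port A

def fA (l : List Char) : List Char :=
  let L := PySem.Chars.lower l
  if PySem.Chars.endswith L ['_','i'] then l.take (l.length - 2)
  else if PySem.Chars.endswith L ['_','i','i'] then l.take (l.length - 3)
  else if PySem.Chars.endswith L ['_','i','i','i'] then l.take (l.length - 4)
  else if PySem.Chars.endswith L ['_','i','v'] then l.take (l.length - 3)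
  else l

def fB (l : List Char) : List Char :=
  let r := l.reverse
  let t := r.takeWhile (fun c => c != '_')
  if t.length = r.length then l
  else if PySem.Chars.lower t.reverse ∈ [['i'], ['i','i'], ['i','i','i'], ['i','v']]
       then (r.drop (t.length + 1)).reverse
       else l

lemma lowerChar_eq_underscore {c : Char} (h : PySem.Chars.lowerChar c = '_') : c = '_' := by
  unfold PySem.Chars.lowerChar at h
  split at h
  · next hu =>
    exfalso
    simp only [PySem.Chars.isupper, Bool.and_eq_true, decide_eq_true_eq, Char.le_def] at hu
    have h1 : 65 ≤ c.toNat := hu.1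
    have h2 : c.toNat ≤ 90 := hu.2
    have hv : (c.toNat + 32).isValidChar := by left; omega
    have := congrArg Char.toNat h
    rw [Char.toNat_ofNat] at this
    simp [hv] at this
    omega
  · exact h

lemma lowerChar_underscore : PySem.Chars.lowerChar '_' = '_' := by decide

lemma endA (r pat : List Char) :
    PySem.Chars.endswith (PySem.Chars.lower r.reverse) pat = true ↔
      pat.reverse <+: r.map PySem.Chars.lowerChar := by
  rw [PySem.Chars.endswith_iff, ← List.reverse_prefix]
  simp [PySem.Chars.lower, List.map_reverse]

lemma endA1 (r : List Char) :
    PySem.Chars.endswith (PySem.Chars.lower r.reverse) ['_','i'] = true ↔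
      ['i','_'] <+: r.map PySem.Chars.lowerChar := by simpa using endA r ['_','i']
lemma endA2 (r : List Char) :
    PySem.Chars.endswith (PySem.Chars.lower r.reverse) ['_','i','i'] = true ↔
      ['i','i','_'] <+: r.map PySem.Chars.lowerChar := by simpa using endA r ['_','i','i']
lemma endA3 (r : List Char) :
    PySem.Chars.endswith (PySem.Chars.lower r.reverse) ['_','i','i','i'] = true ↔
      ['i','i','i','_'] <+: r.map PySem.Chars.lowerChar := by simpa using endA r ['_','i','i','i']
lemma endA4 (r : List Char) :
    PySem.Chars.endswith (PySem.Chars.lower r.reverse) ['_','i','v'] = true ↔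
      ['v','i','_'] <+: r.map PySem.Chars.lowerChar := by simpa using endA r ['_','i','v']

lemma core (r : List Char) : fA r.reverse = fB r.reverse := by
  unfold fA fB
  simp only [List.reverse_reverse, List.length_reverse, endA1, endA2, endA3, endA4]
  rcases r with _ | ⟨a, r1⟩
  · simp
  · by_cases ha : a = '_'
    · subst ha
      simp [List.cons_prefix_cons, PySem.Chars.lower, lowerChar_underscore]
    · have ha' : ¬ ('_' = PySem.Chars.lowerChar a) :=
        fun h => ha (lowerChar_eq_underscore h.symm)
      rcases r1 with _ | ⟨b, r2⟩
      · simp [ha, List.cons_prefix_cons]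
      · by_cases hb : b = '_'
        · subst hb
          by_cases hfa : PySem.Chars.lowerChar a = 'i'
          · simp [ha, List.cons_prefix_cons, hfa, PySem.Chars.lower, lowerChar_underscore]
          · simp [ha, List.cons_prefix_cons, hfa, Ne.symm hfa, PySem.Chars.lower,
                  lowerChar_underscore]
        · have hb' : ¬ ('_' = PySem.Chars.lowerChar b) :=
            fun h => hb (lowerChar_eq_underscore h.symm)
          rcases r2 with _ | ⟨c, r3⟩
          · simp [ha, hb, List.cons_prefix_cons, hb']
          · by_cases hc : c = '_'
            · subst hc
              by_cases hfb : PySem.Chars.lowerChar b = 'i'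
              · by_cases hfa2 : PySem.Chars.lowerChar a = 'i'
                · simp [ha, hb, List.cons_prefix_cons, hfa2, hfb, PySem.Chars.lower,
                        lowerChar_underscore]
                · by_cases hfav : PySem.Chars.lowerChar a = 'v'
                  · simp [ha, hb, List.cons_prefix_cons, hfav, hfb,
                          PySem.Chars.lower, lowerChar_underscore]
                  · simp [ha, hb, List.cons_prefix_cons, hfa2, Ne.symm hfa2, hfav, Ne.symm hfav,
                          hfb, PySem.Chars.lower, lowerChar_underscore]
              · simp [ha, hb, List.cons_prefix_cons, hfb, Ne.symm hfb, hb', PySem.Chars.lower,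
                      lowerChar_underscore]
            · have hc' : ¬ ('_' = PySem.Chars.lowerChar c) :=
                fun h => hc (lowerChar_eq_underscore h.symm)
              rcases r3 with _ | ⟨d, r4⟩
              · simp [ha, hb, hc, List.cons_prefix_cons, hb', hc']
              · by_cases hd : d = '_'
                · subst hd
                  by_cases hfc : PySem.Chars.lowerChar c = 'i'
                  · by_cases hfb2 : PySem.Chars.lowerChar b = 'i'
                    · by_cases hfa3 : PySem.Chars.lowerChar a = 'i'
                      · simp [ha, hb, hc, List.cons_prefix_cons, hfa3, hfb2, hfc,
                              PySem.Chars.lower, lowerChar_underscore]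
                      · simp [ha, hb, hc, List.cons_prefix_cons, hfa3, Ne.symm hfa3, hfb2, hfc,
                              PySem.Chars.lower, lowerChar_underscore]
                    · simp [ha, hb, hc, List.cons_prefix_cons, hfb2, Ne.symm hfb2, hfc, hb',
                            PySem.Chars.lower, lowerChar_underscore]
                  · simp [ha, hb, hc, List.cons_prefix_cons, hfc, Ne.symm hfc, hb', hc',
                          PySem.Chars.lower, lowerChar_underscore]
                · have hd' : ¬ ('_' = PySem.Chars.lowerChar d) :=
                    fun h => hd (lowerChar_eq_underscore h.symm)
                  simp [ha, hb, hc, hd, List.cons_prefix_cons, hb', hc', hd']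
                  intro _ h2
                  exfalso
                  rcases h2 with h|h|h|h <;>
                    · have := congrArg List.length h
                      simp [PySem.Chars.lower] at this

lemma slice_neg (s : String) (k : Nat) (hk : 0 < k) :
    PySem.Str.slice s none (some (-(k:Int))) = String.ofList (s.toList.take (s.toList.length - k)) := by
  rw [← String.toList_inj]
  rw [PySem.Str.toList_slice, PySem.Chars.slice_eq_listSlice, PySem.List.slice_to_neg_natCast _ _ hk]
  simp

lemma portA_toList (s : String) : normalize_image_id_py s = String.ofList (fA s.toList) := by
  unfold normalize_image_id_py fA
  simp only [PySem.Str.endswith_eq, PySem.Str.toList_lower]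
  have h2 : ("_i").toList = ['_','i'] := by decide
  have h3 : ("_ii").toList = ['_','i','i'] := by decide
  have h4 : ("_iii").toList = ['_','i','i','i'] := by decide
  have h5 : ("_iv").toList = ['_','i','v'] := by decide
  rw [h2, h3, h4, h5]
  split_ifs with ha hb hc hd
  · rw [show (-2:Int) = -((2:Nat):Int) from by norm_num]; exact slice_neg s 2 (by omega)
  · rw [show (-3:Int) = -((3:Nat):Int) from by norm_num]; exact slice_neg s 3 (by omega)
  · rw [show (-4:Int) = -((4:Nat):Int) from by norm_num]; exact slice_neg s 4 (by omega)
  · rw [show (-3:Int) = -((3:Nat):Int) from by norm_num]; exact slice_neg s 3 (by omega)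
  · exact s.ofList_toList.symm

lemma portB_toList (s : String) : normalize_image_id_py_alt s = String.ofList (fB s.toList) := by
  unfold normalize_image_id_py_alt pyRPartitionUnderscore fB
  by_cases h : (s.toList.reverse.takeWhile (fun c => c != '_')).length = s.length
  · simp [h]
  · by_cases h2 : PySem.Chars.lower (s.toList.reverse.takeWhile (fun c => c != '_')).reverse
        ∈ [['i'], ['i','i'], ['i','i','i'], ['i','v']]
    · simp [h, h2]
    · simp [h, h2]


-- ===== VERDICT (by name: the statement is the Claim_ definition above) =====
theorem normalize_image_id_py_spec : Claim_equal_normalize_image_id_py := by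
  intro s _
  unfold Spec_normalize_image_id_py
  rw [portA_toList, portB_toList, ← List.reverse_reverse s.toList, core]
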